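-- pv_equiv track=rewrite | github.com/pgarrett-scripps/peptacular | src/peptacular/plotting/plotting_utils.py | _get_charge_legend_labels
-- ===== SOURCE A (Python) =====
-- def _get_charge_legend_labels(charge_symbols: dict[int, str]) -> dict[int, str]:
--     """Generate legend labels for charge states, handling symbol collisions."""
--     if not charge_symbols:
--         return {}
--
--     # Find which symbols are used by multiple charges
--     symbol_to_charges = {}
--     for charge, symbol in charge_symbols.items():
--         if symbol not in symbol_to_charges:
--             symbol_to_charges[symbol] = []
--         symbol_to_charges[symbol].append(charge)
--
--     # Generate labels
--     labels = {}
--     for charge, symbol in charge_symbols.items():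
--         charges_with_same_symbol = sorted(symbol_to_charges[symbol])
--
--         if len(charges_with_same_symbol) > 1:
--             # Multiple charges share this symbol
--             min_charge = min(charges_with_same_symbol)
--             if charge == min_charge:
--                 # This is the lowest charge with this symbol - add + to indicate "and higher"
--                 labels[charge] = f"{charge}+"
--             else:
--                 # Higher charges with same symbol - don't show in legend
--                 labels[charge] = None
--         else:
--             # Only one charge uses this symbol - no + needed
--             labels[charge] = str(charge)
--
--     return labels
-- ===== SOURCE B (Python) =====
-- def _get_charge_legend_labels(charge_symbols: dict[int, str]) -> dict[int, str]:
--     """Generate legend labels for charge states, handling symbol collisions."""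
--     if not charge_symbols:
--         return {}
--
--     # No grouping index at all: for each charge, decide its label directly by
--     # quantifying over the other charges that use the same symbol.
--     items = charge_symbols.items()
--     labels = {}
--     for charge, symbol in items:
--         if all(c == charge for c, s in items if s == symbol):
--             # symbol is unique to this charge
--             labels[charge] = str(charge)
--         elif all(charge <= c for c, s in items if s == symbol):
--             # shared symbol and this is the lowest such charge
--             labels[charge] = f"{charge}+"
--         else:
--             labels[charge] = None
--     return labels
-- ===== Notes on version B (the rewrite author's own statement) =====
-- stated objective: simpler
-- what changed: B drops the symbol_to_charges grouping dict entirely: for each charge it decides the label directly with two quantified scans over the input (all same-symbol charges equal it -> unique symbol; it is <= all same-symbol charges -> lowest of a shared group; otherwise None), instead of building per-symbol lists and sorting/min-scanning them per charge.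
import Mathlib
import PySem

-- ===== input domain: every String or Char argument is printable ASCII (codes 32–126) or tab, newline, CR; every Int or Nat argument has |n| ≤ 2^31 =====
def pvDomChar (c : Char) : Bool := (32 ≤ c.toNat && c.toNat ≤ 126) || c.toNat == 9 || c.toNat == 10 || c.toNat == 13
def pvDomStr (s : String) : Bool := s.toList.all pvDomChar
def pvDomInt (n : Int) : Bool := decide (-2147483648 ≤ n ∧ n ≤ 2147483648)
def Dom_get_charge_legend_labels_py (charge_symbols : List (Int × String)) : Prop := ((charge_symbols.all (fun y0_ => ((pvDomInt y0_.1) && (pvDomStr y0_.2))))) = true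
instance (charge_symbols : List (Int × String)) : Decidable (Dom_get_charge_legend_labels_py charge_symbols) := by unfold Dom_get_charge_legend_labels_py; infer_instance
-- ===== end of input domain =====

-- B drops A's symbol->charges grouping dict entirely and labels each charge by two quantified
-- scans over the input (unique symbol / lowest of a shared group); objective: simpler.

-- ===== PORT A =====
def get_charge_legend_labels_py (charge_symbols : List (Int × String)) : List (Int × Option String) :=
  if charge_symbols = [] then []
  else
    -- symbol_to_charges: 'if symbol not in' inserts []; .append(charge) = modify (key is now present)
    let stc : PySem.Dict String (List Int) := charge_symbols.foldl (fun d p =>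
      let d' := if d.contains p.2 then d else d.insert p.2 ([] : List Int)
      d'.modify p.2 [] (fun l => l ++ [p.1])) PySem.Dict.empty
    let labels : PySem.Dict Int (Option String) := charge_symbols.foldl (fun lab p =>
      let cwss := PySem.List.sorted (stc.getD p.2 []) (fun x => x) false
      if cwss.length > 1 then
        -- min(cwss): cwss is nonempty here, so min? is some; getD 0 extracts its value
        let min_charge := (PySem.List.min? cwss (fun x => x)).getD 0
        if p.1 = min_charge then lab.insert p.1 (some (PySem.Int.toStr p.1 ++ "+"))
        else lab.insert p.1 none
      else lab.insert p.1 (some (PySem.Int.toStr p.1))) PySem.Dict.empty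
    labels.items

-- ===== PORT B =====
def get_charge_legend_labels_py_alt (charge_symbols : List (Int × String)) : List (Int × Option String) :=
  if charge_symbols = [] then []
  else
    (charge_symbols.foldl (fun lab p =>
      -- all(c == charge for c, s in items if s == symbol)
      if (charge_symbols.filter (fun q => q.2 == p.2)).all (fun q => q.1 == p.1) then
        lab.insert p.1 (some (PySem.Int.toStr p.1))
      -- all(charge <= c for c, s in items if s == symbol)
      else if (charge_symbols.filter (fun q => q.2 == p.2)).all (fun q => decide (p.1 ≤ q.1)) then
        lab.insert p.1 (some (PySem.Int.toStr p.1 ++ "+"))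
      else lab.insert p.1 none) PySem.Dict.empty).items

-- ===== PRECONDITION & SPEC =====
-- The argument models a Python dict, whose keys are necessarily distinct; association lists with
-- duplicate keys correspond to no Python input, so they are excluded.
def Pre_get_charge_legend_labels_py (charge_symbols : List (Int × String)) : Prop :=
  (charge_symbols.map Prod.fst).Nodup
instance (charge_symbols : List (Int × String)) : Decidable (Pre_get_charge_legend_labels_py charge_symbols) := by unfold Pre_get_charge_legend_labels_py; infer_instance
def pvWitness_get_charge_legend_labels_py : (List (Int × String)) := [(1, "+"), (2, "+"), (3, "o")]
def Spec_get_charge_legend_labels_py (charge_symbols : List (Int × String)) (out : List (Int × Option String)) : Prop := out = get_charge_legend_labels_py_alt charge_symbols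
instance (charge_symbols : List (Int × String)) (out : List (Int × Option String)) : Decidable (Spec_get_charge_legend_labels_py charge_symbols out) := by unfold Spec_get_charge_legend_labels_py; infer_instance

-- ===== CLAIM (what is proved, stated in full; the proofs are below) =====
def Claim_equal_get_charge_legend_labels_py : Prop := ∀ (charge_symbols : List (Int × String)), Dom_get_charge_legend_labels_py charge_symbols → Pre_get_charge_legend_labels_py charge_symbols → Spec_get_charge_legend_labels_py charge_symbols (get_charge_legend_labels_py charge_symbols)

-- ===== LEMMAS AND PROOFS =====

-- A's setdefault-then-append step is the plain grouping modify step
lemma pv_step_eq (d : PySem.Dict String (List Int)) (p : Int × String) :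
    (if d.contains p.2 then d else d.insert p.2 ([] : List Int)).modify p.2 [] (fun l => l ++ [p.1])
      = d.modify p.2 [] (fun l => l ++ [p.1]) := by
  by_cases h : d.contains p.2
  · simp [h]
  · rw [if_neg (by simp [h])]
    show (d.insert p.2 []).insert p.2 (((d.insert p.2 []).getD p.2 []) ++ [p.1])
        = d.insert p.2 ((d.getD p.2 []) ++ [p.1])
    rw [PySem.Dict.getD_insert_self, PySem.Dict.insert_insert_self,
        PySem.Dict.getD_of_not_contains (h := by simp [h])]

-- symbol_to_charges[s] is the in-order list of charges whose symbol is s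
lemma pv_stc_getD (xs : List (Int × String)) (s : String) :
    (xs.foldl (fun d p =>
        let d' := if d.contains p.2 then d else d.insert p.2 ([] : List Int)
        d'.modify p.2 [] (fun l => l ++ [p.1])) PySem.Dict.empty).getD s []
      = (xs.filter (fun p => p.2 == s)).map Prod.fst := by
  have h1 : (xs.foldl (fun d p =>
        let d' := if d.contains p.2 then d else d.insert p.2 ([] : List Int)
        d'.modify p.2 [] (fun l => l ++ [p.1])) PySem.Dict.empty)
      = xs.foldl (fun d p => d.modify p.2 [] (fun l => l ++ [p.1])) PySem.Dict.empty := by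
    congr 1; funext d p; exact pv_step_eq d p
  rw [h1]
  have h2 : xs.foldl (fun d p => d.modify p.2 [] (fun l => l ++ [p.1])) PySem.Dict.empty
      = (xs.map Prod.swap).foldl (fun d q => d.modify q.1 [] (fun l => l ++ [q.2])) PySem.Dict.empty := by
    rw [List.foldl_map]; rfl
  rw [h2, PySem.Dict.getD_foldl_modify_append]
  simp [List.filter_map, List.map_map, Function.comp_def, Prod.swap]

lemma pv_mem_group {xs : List (Int × String)} {p : Int × String} (hp : p ∈ xs) :
    p.1 ∈ (xs.filter (fun q => q.2 == p.2)).map Prod.fst := by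
  exact List.mem_map_of_mem (List.mem_filter.mpr ⟨hp, by simp⟩)

-- min of the sorted group equals the running min over the group
lemma pv_min_sorted_eq (c : Int) (t : List Int) (m : Int) (t' : List Int)
    (hs : PySem.List.sorted (c :: t) (fun x => x) false = m :: t') :
    (t'.foldl min m) = t.foldl min c := by
  have hmin1 : PySem.List.min? (m :: t') (fun x => x) = some (t'.foldl min m) :=
    PySem.List.min?_id_cons _ _
  have hmin2 : PySem.List.min? (c :: t) (fun x => x) = some (t.foldl min c) :=
    PySem.List.min?_id_cons _ _
  have hperm : (m :: t').Perm (c :: t) := by rw [← hs]; exact PySem.List.sorted_perm _ _ _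
  exact le_antisymm
    (PySem.List.min?_isMin hmin1 _ (hperm.mem_iff.mpr (PySem.List.min?_mem hmin2)))
    (PySem.List.min?_isMin hmin2 _ (hperm.mem_iff.mp (PySem.List.min?_mem hmin1)))

-- A's per-charge label, written as a value
def pvLabelA (stc : PySem.Dict String (List Int)) (p : Int × String) : Option String :=
  let cwss := PySem.List.sorted (stc.getD p.2 []) (fun x => x) false
  if cwss.length > 1 then
    if p.1 = (PySem.List.min? cwss (fun x => x)).getD 0 then some (PySem.Int.toStr p.1 ++ "+")
    else none
  else some (PySem.Int.toStr p.1)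

-- B's per-charge label, as a value of the charge and its symbol's group
def pvLabelB (g : List Int) (c : Int) : Option String :=
  if g.all (fun x => x == c) then some (PySem.Int.toStr c)
  else if g.all (fun x => decide (c ≤ x)) then some (PySem.Int.toStr c ++ "+")
  else none

-- ===== VERDICT (by name: the statement is the Claim_ definition above) =====
theorem get_charge_legend_labels_py_spec : Claim_equal_get_charge_legend_labels_py := by
  intro xs _ hpre
  unfold Spec_get_charge_legend_labels_py get_charge_legend_labels_py get_charge_legend_labels_py_alt
  by_cases hnil : xs = []
  · simp [hnil]
  · simp only [hnil, if_false]
    set stc : PySem.Dict String (List Int) := xs.foldl (fun d p =>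
      let d' := if d.contains p.2 then d else d.insert p.2 ([] : List Int)
      d'.modify p.2 [] (fun l => l ++ [p.1])) PySem.Dict.empty with hstc
    -- A's label loop inserts pvLabelA per element
    have hA : (xs.foldl (fun lab p =>
        let cwss := PySem.List.sorted (stc.getD p.2 []) (fun x => x) false
        if cwss.length > 1 then
          let min_charge := (PySem.List.min? cwss (fun x => x)).getD 0
          if p.1 = min_charge then lab.insert p.1 (some (PySem.Int.toStr p.1 ++ "+"))
          else lab.insert p.1 none
        else lab.insert p.1 (some (PySem.Int.toStr p.1))) PySem.Dict.empty)
        = xs.foldl (fun lab p => lab.insert p.1 (pvLabelA stc p)) PySem.Dict.empty := by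
      congr 1; funext lab p
      simp only [pvLabelA]
      split_ifs <;> rfl
    have hAitems : (xs.foldl (fun lab p => lab.insert p.1 (pvLabelA stc p)) PySem.Dict.empty).items
        = xs.map (fun p => (p.1, pvLabelA stc p)) := by
      rw [PySem.Dict.items_foldl_insert_fresh xs Prod.fst (pvLabelA stc)
        PySem.Dict.empty (fun a _ => PySem.Dict.contains_empty _) hpre]
      rfl
    -- B's label loop inserts pvLabelB of the filtered group per element
    have hB : (xs.foldl (fun lab p =>
        if (xs.filter (fun q => q.2 == p.2)).all (fun q => q.1 == p.1) then
          lab.insert p.1 (some (PySem.Int.toStr p.1))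
        else if (xs.filter (fun q => q.2 == p.2)).all (fun q => decide (p.1 ≤ q.1)) then
          lab.insert p.1 (some (PySem.Int.toStr p.1 ++ "+"))
        else lab.insert p.1 none) PySem.Dict.empty)
        = xs.foldl (fun lab p =>
            lab.insert p.1 (pvLabelB ((xs.filter (fun q => q.2 == p.2)).map Prod.fst) p.1))
          PySem.Dict.empty := by
      congr 1; funext lab p
      simp only [pvLabelB, List.all_map, Function.comp_def]
      split_ifs <;> rfl
    have hBitems : (xs.foldl (fun lab p =>
          lab.insert p.1 (pvLabelB ((xs.filter (fun q => q.2 == p.2)).map Prod.fst) p.1))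
          PySem.Dict.empty).items
        = xs.map (fun p => (p.1, pvLabelB ((xs.filter (fun q => q.2 == p.2)).map Prod.fst) p.1)) := by
      rw [PySem.Dict.items_foldl_insert_fresh xs Prod.fst
        (fun p => pvLabelB ((xs.filter (fun q => q.2 == p.2)).map Prod.fst) p.1)
        PySem.Dict.empty (fun a _ => PySem.Dict.contains_empty _) hpre]
      rfl
    rw [hA, hAitems, hB, hBitems]
    apply List.map_congr_left
    intro p hp
    -- per-element label equality
    have hg : stc.getD p.2 [] = (xs.filter (fun q => q.2 == p.2)).map Prod.fst := by
      rw [hstc]; exact pv_stc_getD xs p.2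
    have hmem : p.1 ∈ (xs.filter (fun q => q.2 == p.2)).map Prod.fst := pv_mem_group hp
    have hgnd : ((xs.filter (fun q => q.2 == p.2)).map Prod.fst).Nodup :=
      (List.Sublist.map Prod.fst (List.filter_sublist (l := xs) (p := fun q : Int × String => q.2 == p.2))).nodup hpre
    obtain ⟨c, t, hct⟩ : ∃ c t, (xs.filter (fun q => q.2 == p.2)).map Prod.fst = c :: t := by
      cases h : (xs.filter (fun q => q.2 == p.2)).map Prod.fst with
      | nil => rw [h] at hmem; cases hmem
      | cons c t => exact ⟨c, t, rfl⟩
    rw [hct] at hmem hgnd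
    obtain ⟨m, t', hmt⟩ : ∃ m t',
        PySem.List.sorted (c :: t) (fun x => x) false = m :: t' := by
      cases h : PySem.List.sorted (c :: t) (fun x => x) false with
      | nil => exact absurd h (by simp [PySem.List.sorted_eq_nil_iff])
      | cons m t' => exact ⟨m, t', rfl⟩
    have hlen : t'.length = t.length := by
      have := PySem.List.length_sorted (xs := c :: t) (key := fun x : Int => x) (rev := false)
      rw [hmt] at this; simpa using this
    have hminv : (PySem.List.min? (m :: t') (fun x => x)).getD 0 = t.foldl min c := by
      rw [PySem.List.min?_id_cons _ _]; exact pv_min_sorted_eq c t m t' hmt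
    -- the running min is a member and a lower bound of the group
    have hmin2 : PySem.List.min? (c :: t) (fun x => x) = some (t.foldl min c) :=
      PySem.List.min?_id_cons _ _
    have hMmem : t.foldl min c ∈ c :: t := PySem.List.min?_mem hmin2
    have hMle : ∀ x ∈ c :: t, t.foldl min c ≤ x := PySem.List.min?_isMin hmin2
    simp only [pvLabelA, pvLabelB, hg, hct, hmt, hminv]
    cases t with
    | nil =>
      -- singleton group: c = p.1, both branches give str(charge)
      simp at hlen
      have hc : c = p.1 := by have h := List.mem_singleton.mp hmem; exact h.symm
      simp [hlen, hc]
    | cons c2 t2 =>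
      have h1 : (m :: t').length > 1 := by simp [hlen]
      -- the all-equal test fails: c and c2 are distinct, so not both equal p.1
      have hne : c ≠ c2 := by
        intro h; exact (List.nodup_cons.mp hgnd).1 (h ▸ List.mem_cons_self)
      have hall1 : ((c :: c2 :: t2).all (fun x => x == p.1)) = false := by
        by_contra h
        have h' := List.all_eq_true.mp (Bool.not_eq_false _ |>.mp h)
        have e1 : c = p.1 := by simpa using h' c List.mem_cons_self
        have e2 : c2 = p.1 := by
          simpa using h' c2 (List.mem_cons_of_mem _ List.mem_cons_self)
        exact hne (e1.trans e2.symm)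
      -- the lower-bound test holds iff p.1 is the group min
      have hall2 : ((c :: c2 :: t2).all (fun x => decide (p.1 ≤ x))) = true
          ↔ p.1 = (c2 :: t2).foldl min c := by
        constructor
        · intro h
          have h' := List.all_eq_true.mp h
          exact le_antisymm (by simpa using h' _ hMmem) (hMle _ hmem)
        · intro h
          exact List.all_eq_true.mpr (fun x hx => by simpa using h ▸ hMle x hx)
      simp only [h1, if_pos, hall1, Bool.false_eq_true, if_false]
      by_cases hpm : p.1 = (c2 :: t2).foldl min c
      · rw [if_pos hpm, if_pos (hall2.mpr hpm)]
      · rw [if_neg hpm, if_neg (fun h => hpm (hall2.mp h))]
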